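-- pv_equiv track=rewrite | github.com/KwonTaeyong/Python_v7 | learning159.py | solution
-- ===== SOURCE A (Python) =====
-- def solution(grid):
--     n = len(grid)
--     m = len(grid[0])
--
--     parent = {}
--     size = {}
--
--     def find(x):
--         if parent[x] != x:
--             parent[x] = find(parent[x])
--         return parent[x]
--
--     def union(a, b):
--         ra, rb = find(a), find(b)
--         if ra != rb:
--             parent[rb] = ra
--             size[ra] += size[rb]
--
--     # 각 칸의 두 삼각형을 노드로 만든다
--     for i in range(n):
--         for j in range(m):
--             for t in (0, 1):
--                 idx = (i, j, t)
--                 parent[idx] = idx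
--                 size[idx] = 1
--
--     # 연결 처리
--     for i in range(n):
--         for j in range(m):
--             diag = grid[i][j]
--
--             # 오른쪽 칸
--             if j + 1 < m:
--                 if diag == 1:  # /
--                     union((i, j, 1), (i, j + 1, 0))
--                 else:          # \
--                     union((i, j, 0), (i, j + 1, 1))
--
--             # 아래 칸
--             if i + 1 < n:
--                 if diag == 1:  # /
--                     union((i, j, 0), (i + 1, j, 1))
--                 else:          # \
--                     union((i, j, 1), (i + 1, j, 0))
--
--     # 각 칸에서 하나만 선택하므로,
--     # 두 삼각형 중 큰 쪽을 선택한 효과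
--     best = 0
--     visited = set()
--
--     for i in range(n):
--         for j in range(m):
--             a = find((i, j, 0))
--             b = find((i, j, 1))
--             if a not in visited:
--                 best = max(best, size[a])
--                 visited.add(a)
--             if b not in visited:
--                 best = max(best, size[b])
--                 visited.add(b)
--
--     return best
-- ===== SOURCE B (Python) =====
-- def solution(grid):
--     n = len(grid)
--     m = len(grid[0])
--
--     # undirected triangle-adjacency edges, one list built up front
--     edges = []
--     for i in range(n):
--         for j in range(m):
--             if grid[i][j] == 1:          # '/'
--                 if j + 1 < m:
--                     edges.append(((i, j, 1), (i, j + 1, 0)))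
--                 if i + 1 < n:
--                     edges.append(((i, j, 0), (i + 1, j, 1)))
--             else:                        # '\'
--                 if j + 1 < m:
--                     edges.append(((i, j, 0), (i, j + 1, 1)))
--                 if i + 1 < n:
--                     edges.append(((i, j, 1), (i + 1, j, 0)))
--
--     label = {(i, j, t): (i, j, t)
--              for i in range(n) for j in range(m) for t in (0, 1)}
--
--     # merge: eagerly relabel the whole smaller-named class; no parent forest, no sizes
--     for a, b in edges:
--         ra, rb = label[a], label[b]
--         if ra != rb:
--             for x in label:
--                 if label[x] == rb:
--                     label[x] = ra
--
--     # component sizes are just label multiplicities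
--     counts = {}
--     for r in label.values():
--         counts[r] = counts.get(r, 0) + 1
--
--     best = 0
--     for c in counts.values():
--         if c > best:
--             best = c
--     return best
-- ===== Notes on version B (the rewrite author's own statement) =====
-- stated objective: alternative
-- what changed: B replaces A's union-find (parent forest with recursive path-compressing find, an incrementally maintained size table and a visited-set max pass) by: an explicit edge list built up front, component labels computed by eagerly relabelling a flat node-to-label map on each edge, and component sizes recovered at the end by counting label multiplicities with a dict counter.
-- outside the precondition, e.g. on solution([]): A raises IndexError, B raises IndexError; on solution([[1, 1], [1]]): A raises IndexError, B raises IndexError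
import Mathlib
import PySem

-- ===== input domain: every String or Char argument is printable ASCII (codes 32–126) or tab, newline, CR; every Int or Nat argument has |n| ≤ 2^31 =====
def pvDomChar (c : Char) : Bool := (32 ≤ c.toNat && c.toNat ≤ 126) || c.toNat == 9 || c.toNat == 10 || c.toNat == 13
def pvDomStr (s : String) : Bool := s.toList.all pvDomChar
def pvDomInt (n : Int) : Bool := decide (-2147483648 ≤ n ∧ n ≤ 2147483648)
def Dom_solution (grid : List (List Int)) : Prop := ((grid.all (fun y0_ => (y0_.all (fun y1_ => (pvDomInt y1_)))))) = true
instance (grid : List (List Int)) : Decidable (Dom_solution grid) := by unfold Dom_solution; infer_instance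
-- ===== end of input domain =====

set_option maxHeartbeats 1000000


-- B replaces A's union-find (recursive path-compressing find, incremental size table,
-- visited-set max pass) by an explicit edge list, eager whole-class relabelling of a flat
-- node→label map, and a terminal counting pass over label multiplicities (objective: alternative).

abbrev PNd : Type := Int × Int × Int
abbrev PPar : Type := PySem.Dict PNd PNd
abbrev PSz : Type := PySem.Dict PNd Int

-- ===== PORT A =====
-- find(x) with path compression; the returned dict is the mutated `parent`.
-- fuel only makes the recursion structural: every call made by `solution` has
-- (recursion depth) < fuel, so the fuel-0 branch is never reached.
def pvFind (fuel : Nat) (parent : PPar) (x : PNd) : PPar × PNd :=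
  match fuel with
  | 0 => (parent, x)
  | fuel + 1 =>
    let px := parent.getD x x          -- parent[x]; the key is always present
    if px ≠ x then
      let r := pvFind fuel parent px
      (r.1.insert x r.2, r.2)
    else (parent, x)

def pvUnion (fuel : Nat) (st : PPar × PSz) (a b : PNd) : PPar × PSz :=
  let f1 := pvFind fuel st.1 a
  let f2 := pvFind fuel f1.1 b
  if f1.2 ≠ f2.2 then
    (f2.1.insert f2.2 f1.2, st.2.insert f1.2 (st.2.getD f1.2 0 + st.2.getD f2.2 0))
  else (f2.1, st.2)

-- for t in (0, 1): parent[(i,j,t)] = (i,j,t); size[(i,j,t)] = 1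
def pvInitCellA (pr : PPar × PSz) (i j : Nat) : PPar × PSz :=
  [(0 : Int), 1].foldl (fun pr t =>
    (pr.1.insert (↑i, ↑j, t) (↑i, ↑j, t), pr.2.insert (↑i, ↑j, t) 1)) pr

def pvLinkCellA (fuel n m : Nat) (grid : List (List Int)) (st : PPar × PSz) (i j : Nat) :
    PPar × PSz :=
  let diag := (grid.getD i []).getD j 0   -- grid[i][j]; i < n, j < m; too-short rows are excluded by Pre_
  let st1 := if j + 1 < m then
      (if diag = 1 then pvUnion fuel st (↑i, ↑j, 1) (↑i, ↑(j+1), 0)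
       else pvUnion fuel st (↑i, ↑j, 0) (↑i, ↑(j+1), 1))
    else st
  if i + 1 < n then
      (if diag = 1 then pvUnion fuel st1 (↑i, ↑j, 0) (↑(i+1), ↑j, 1)
       else pvUnion fuel st1 (↑i, ↑j, 1) (↑(i+1), ↑j, 0))
  else st1

def pvBestCellA (fuel : Nat) (sz : PSz) (acc : Int × PySem.Set PNd × PPar) (i j : Nat) :
    Int × PySem.Set PNd × PPar :=
  let f1 := pvFind fuel acc.2.2 (↑i, ↑j, 0)
  let f2 := pvFind fuel f1.1 (↑i, ↑j, 1)
  let acc1 : Int × PySem.Set PNd × PPar :=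
    if !(PySem.Set.contains acc.2.1 f1.2) then
      (max acc.1 (sz.getD f1.2 0), PySem.Set.add acc.2.1 f1.2, f2.1)
    else (acc.1, acc.2.1, f2.1)
  if !(PySem.Set.contains acc1.2.1 f2.2) then
    (max acc1.1 (sz.getD f2.2 0), PySem.Set.add acc1.2.1 f2.2, acc1.2.2)
  else acc1

def solution (grid : List (List Int)) : Int :=
  let n := grid.length
  let m := (grid.headD []).length      -- grid[0]: the IndexError on grid = [] is excluded by Pre_
  let fuel := 2 * n * m + 1
  let st0 := (List.range n).foldl (fun pr i =>
      (List.range m).foldl (fun pr j => pvInitCellA pr i j) pr)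
    (PySem.Dict.empty, PySem.Dict.empty)
  let st := (List.range n).foldl (fun st i =>
      (List.range m).foldl (fun st j => pvLinkCellA fuel n m grid st i j) st) st0
  let fin := (List.range n).foldl (fun acc i =>
      (List.range m).foldl (fun acc j => pvBestCellA fuel st.2 acc i j) acc)
    ((0 : Int), PySem.Set.empty, st.1)
  fin.1

-- ===== PORT B =====
-- the per-cell edges appended by Source B's edge-building loop
def pvCellEdges (n m : Nat) (grid : List (List Int)) (i j : Nat) : List (PNd × PNd) :=
  if (grid.getD i []).getD j 0 = 1 then          -- '/'
    (if j + 1 < m then ([((↑i, ↑j, 1), (↑i, ↑(j+1), 0))] : List (PNd × PNd)) else []) ++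
    (if i + 1 < n then ([((↑i, ↑j, 0), (↑(i+1), ↑j, 1))] : List (PNd × PNd)) else [])
  else                                            -- '\'
    (if j + 1 < m then ([((↑i, ↑j, 0), (↑i, ↑(j+1), 1))] : List (PNd × PNd)) else []) ++
    (if i + 1 < n then ([((↑i, ↑j, 1), (↑(i+1), ↑j, 0))] : List (PNd × PNd)) else [])

def pvEdges (n m : Nat) (grid : List (List Int)) : List (PNd × PNd) :=
  (List.range n).flatMap (fun i => (List.range m).flatMap (fun j => pvCellEdges n m grid i j))

-- the node order of Source B's dict comprehension
def pvNodes (n m : Nat) : List PNd :=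
  (List.range n).flatMap (fun (i : Nat) => (List.range m).flatMap
    (fun (j : Nat) => [((i:Int), (j:Int), (0:Int)), ((i:Int), (j:Int), (1:Int))]))

-- for x in label: if label[x] == rb: label[x] = ra
def pvRelabel (label : PPar) (ra rb : PNd) : PPar :=
  label.keys.foldl (fun d x => if d.getD x x = rb then d.insert x ra else d) label

def pvMergeB (l : PPar) (a b : PNd) : PPar :=
  let ra := l.getD a a               -- label[a]; the key is always present
  let rb := l.getD b b
  if ra ≠ rb then pvRelabel l ra rb else l

def solution_alt (grid : List (List Int)) : Int :=
  let n := grid.length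
  let m := (grid.headD []).length    -- grid[0]: the IndexError on grid = [] is excluded by Pre_
  let label0 := (pvNodes n m).foldl (fun d x => d.insert x x) PySem.Dict.empty
  let label := (pvEdges n m grid).foldl (fun l e => pvMergeB l e.1 e.2) label0
  let counts := label.values.foldl (fun c r => c.insert r (c.getD r 0 + 1))
    (PySem.Dict.empty : PSz)
  counts.values.foldl (fun best c => if c > best then c else best) 0

-- ===== PRECONDITION & SPEC =====
-- Pre_ excludes exactly the inputs where the Python A raises: the empty grid
-- (grid[0] → IndexError) and grids with a row shorter than the first row
-- (grid[i][j] → IndexError).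
def Pre_solution (grid : List (List Int)) : Prop :=
  grid ≠ [] ∧ ∀ row ∈ grid, (grid.headD []).length ≤ row.length
instance (grid : List (List Int)) : Decidable (Pre_solution grid) := by
  unfold Pre_solution; infer_instance

def pvWitness_solution : List (List Int) := [[1, 0], [0, 1]]

def Spec_solution (grid : List (List Int)) (out : Int) : Prop := out = solution_alt grid
instance (grid : List (List Int)) (out : Int) : Decidable (Spec_solution grid out) := by
  unfold Spec_solution; infer_instance

-- ===== CLAIM (what is proved, stated in full; the proofs are below) =====
def Claim_equal_solution : Prop :=
  ∀ (grid : List (List Int)), Dom_solution grid → Pre_solution grid →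
    Spec_solution grid (solution grid)

-- ===== LEMMAS AND PROOFS =====

-- parent/label dicts read as total functions (Python's `d[x]` on an always-present key)
def pvPf (p : PPar) (x : PNd) : PNd := p.getD x x

theorem pvPf_def (p : PPar) (x : PNd) : p.getD x x = pvPf p x := rfl

theorem pvPf_insert (p : PPar) (x v y : PNd) :
    pvPf (p.insert x v) y = if y = x then v else pvPf p y := by
  simp [pvPf, PySem.Dict.getD_insert]

def pvIter (f : PNd → PNd) : Nat → PNd → PNd
  | 0, x => x
  | k+1, x => pvIter f k (f x)

theorem pvIter_add (f : PNd → PNd) (a b : Nat) (x : PNd) :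
    pvIter f (a + b) x = pvIter f b (pvIter f a x) := by
  induction a generalizing x with
  | zero => simp [pvIter]
  | succ a ih =>
    have h : a + 1 + b = (a + b) + 1 := by omega
    rw [h]
    show pvIter f (a + b) (f x) = _
    rw [ih]
    rfl

theorem pvIter_fix {f : PNd → PNd} {r : PNd} (h : f r = r) (k : Nat) : pvIter f k r = r := by
  induction k with
  | zero => rfl
  | succ k ih => simp [pvIter, h, ih]

theorem pvRoot_unique {f : PNd → PNd} {a b : Nat} {x r s : PNd}
    (ha : pvIter f a x = r) (hr : f r = r) (hb : pvIter f b x = s) (hs : f s = s) : r = s := by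
  rcases le_total a b with h | h
  · have : pvIter f b x = r := by
      have hab : b = a + (b - a) := by omega
      rw [hab, pvIter_add, ha, pvIter_fix hr]
    exact this.symm.trans hb
  · have : pvIter f a x = s := by
      have hab : a = b + (a - b) := by omega
      rw [hab, pvIter_add, hb, pvIter_fix hs]
    exact (this.symm.trans ha).symm

-- the simulation invariant: A's parent forest realises exactly B's label map
structure pvInv (S : List PNd) (p l : PPar) (d : Nat) : Prop where
  keysP : p.keys = S
  keysL : l.keys = S
  pfMem : ∀ x ∈ S, pvPf p x ∈ S
  lbMem : ∀ x ∈ S, pvPf l x ∈ S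
  rootFix : ∀ x ∈ S, pvPf p (pvPf l x) = pvPf l x
  chain : ∀ x ∈ S, ∃ k, k ≤ d ∧ pvIter (pvPf p) k x = pvPf l x

-- A's size table holds, at each label-root, the multiplicity of that label
def pvSzInv (S : List PNd) (l : PPar) (sz : PSz) : Prop :=
  ∀ r ∈ S, pvPf l r = r → sz.getD r 0 = ((S.map (pvPf l)).count r : Int)

theorem pvInv_mono {S p l d d'} (h : pvInv S p l d) (hd : d ≤ d') : pvInv S p l d' := by
  refine ⟨h.keysP, h.keysL, h.pfMem, h.lbMem, h.rootFix, ?_⟩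
  intro x hx
  obtain ⟨k, hk, hch⟩ := h.chain x hx
  exact ⟨k, by omega, hch⟩

theorem pvLb_idem {S p l d} (h : pvInv S p l d) {x : PNd} (hx : x ∈ S) :
    pvPf l (pvPf l x) = pvPf l x := by
  obtain ⟨k, _, hch⟩ := h.chain (pvPf l x) (h.lbMem x hx)
  have hfix := pvIter_fix (h.rootFix x hx) k
  rw [hfix] at hch
  exact hch.symm

theorem pvLb_step {S p l d} (h : pvInv S p l d) {x : PNd} (hx : x ∈ S) :
    pvPf l (pvPf p x) = pvPf l x := by
  obtain ⟨k, _, hch⟩ := h.chain x hx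
  cases k with
  | zero =>
    have hx0 : pvPf l x = x := hch.symm
    have hpx : pvPf p x = x := by
      have := h.rootFix x hx; rw [hx0] at this; exact this
    rw [hpx]
  | succ k =>
    simp only [pvIter] at hch
    obtain ⟨k2, _, hch2⟩ := h.chain (pvPf p x) (h.pfMem x hx)
    exact pvRoot_unique hch2 (h.rootFix _ (h.pfMem x hx)) hch (h.rootFix x hx)

theorem pvChain_insert {S p l d} (h : pvInv S p l d) {x : PNd} (hx : x ∈ S) :
    ∀ (k : Nat) (y : PNd), y ∈ S → pvIter (pvPf p) k y = pvPf l y →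
    ∃ k', k' ≤ k ∧ pvIter (pvPf (p.insert x (pvPf l x))) k' y = pvPf l y := by
  intro k
  induction k with
  | zero =>
    intro y _ hch
    exact ⟨0, le_refl 0, hch⟩
  | succ k ih =>
    intro y hy hch
    by_cases hyx : y = x
    · subst hyx
      refine ⟨1, by omega, ?_⟩
      simp [pvIter, pvPf_insert]
    · have hz : pvPf p y ∈ S := h.pfMem y hy
      have hstep : pvPf l (pvPf p y) = pvPf l y := pvLb_step h hy
      simp only [pvIter] at hch
      rw [← hstep] at hch
      obtain ⟨k', hk', hch'⟩ := ih (pvPf p y) hz hch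
      refine ⟨k' + 1, by omega, ?_⟩
      simp only [pvIter, pvPf_insert, if_neg hyx]
      rw [hstep] at hch'
      exact hch'

theorem pvInv_insert_root {S p l d} (h : pvInv S p l d) {x : PNd} (hx : x ∈ S) :
    pvInv S (p.insert x (pvPf l x)) l d := by
  refine ⟨?_, h.keysL, ?_, h.lbMem, ?_, ?_⟩
  · rw [PySem.Dict.keys_insert_of_contains, h.keysP]
    exact (PySem.Dict.contains_iff_mem_keys _ _).mpr (h.keysP ▸ hx)
  · intro y hy
    rw [pvPf_insert]
    split
    · exact h.lbMem x hx
    · exact h.pfMem y hy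
  · intro y hy
    rw [pvPf_insert]
    by_cases hc : pvPf l y = x
    · rw [if_pos hc, ← hc, pvLb_idem h hy]
    · rw [if_neg hc]
      exact h.rootFix y hy
  · intro y hy
    obtain ⟨k, hk, hch⟩ := h.chain y hy
    obtain ⟨k', hk', hch'⟩ := pvChain_insert h hx k y hy hch
    exact ⟨k', by omega, hch'⟩

theorem pvFind_go {S l d} :
    ∀ (k fuel : Nat) (p : PPar) (x : PNd), pvInv S p l d → x ∈ S →
      pvIter (pvPf p) k x = pvPf l x → k < fuel →
      (pvFind fuel p x).2 = pvPf l x ∧ pvInv S (pvFind fuel p x).1 l d := by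
  intro k
  induction k with
  | zero =>
    intro fuel p x h hx hch hf
    have hlx : pvPf l x = x := hch.symm
    have hpx : pvPf p x = x := by
      have := h.rootFix x hx; rw [hlx] at this; exact this
    obtain ⟨fuel, rfl⟩ : ∃ f', fuel = f' + 1 := ⟨fuel - 1, by omega⟩
    simp only [pvFind, pvPf_def, hpx, ne_eq, not_true_eq_false, if_false, hlx]
    exact ⟨trivial, h⟩
  | succ k ih =>
    intro fuel p x h hx hch hf
    obtain ⟨fuel, rfl⟩ : ∃ f', fuel = f' + 1 := ⟨fuel - 1, by omega⟩
    by_cases hne : pvPf p x = x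
    · have hit : pvIter (pvPf p) (k+1) x = x := pvIter_fix hne (k+1)
      have hlx : pvPf l x = x := by rw [hit] at hch; exact hch.symm
      simp only [pvFind, pvPf_def, hne, ne_eq, not_true_eq_false, if_false, hlx]
      exact ⟨trivial, h⟩
    · have hz : pvPf p x ∈ S := h.pfMem x hx
      have hstep : pvPf l (pvPf p x) = pvPf l x := pvLb_step h hx
      simp only [pvIter] at hch
      rw [← hstep] at hch
      have hrec := ih fuel p (pvPf p x) h hz hch (by omega)
      have hun : pvFind (fuel+1) p x
          = ((pvFind fuel p (pvPf p x)).1.insert x (pvFind fuel p (pvPf p x)).2,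
             (pvFind fuel p (pvPf p x)).2) := by
        simp only [pvFind, pvPf_def, ne_eq, hne, not_false_eq_true, if_true]
      rw [hun]
      have h2 : (pvFind fuel p (pvPf p x)).2 = pvPf l x := by rw [hrec.1, hstep]
      constructor
      · exact h2
      · rw [h2]
        exact pvInv_insert_root hrec.2 hx

theorem pvFind_spec {S p l d fuel} (h : pvInv S p l d) {x : PNd} (hx : x ∈ S)
    (hf : d < fuel) :
    (pvFind fuel p x).2 = pvPf l x ∧ pvInv S (pvFind fuel p x).1 l d := by
  obtain ⟨k, hk, hch⟩ := h.chain x hx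
  exact pvFind_go k fuel p x h hx hch (by omega)

-- pvRelabel: the whole-class relabel loop of B
theorem pvRelabel_keys_go (ra rb : PNd) :
    ∀ (ks : List PNd) (dd : PPar), (∀ k ∈ ks, k ∈ dd.keys) →
    (ks.foldl (fun d x => if d.getD x x = rb then d.insert x ra else d) dd).keys = dd.keys := by
  intro ks
  induction ks with
  | nil => intro dd _; rfl
  | cons k ks ih =>
    intro dd hks
    simp only [List.foldl_cons]
    have hkk : (if dd.getD k k = rb then dd.insert k ra else dd).keys = dd.keys := by
      split
      · rw [PySem.Dict.keys_insert_of_contains]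
        exact (PySem.Dict.contains_iff_mem_keys _ _).mpr (hks k (List.mem_cons_self))
      · rfl
    rw [ih _ (by intro y hy; rw [hkk]; exact hks y (List.mem_cons_of_mem _ hy)), hkk]

theorem pvRelabel_go (ra rb : PNd) :
    ∀ (ks : List PNd) (dd : PPar), ks.Nodup → (∀ k ∈ ks, k ∈ dd.keys) → ∀ (y : PNd),
    pvPf (ks.foldl (fun d x => if d.getD x x = rb then d.insert x ra else d) dd) y
      = if y ∈ ks ∧ pvPf dd y = rb then ra else pvPf dd y := by
  intro ks
  induction ks with
  | nil => intro dd _ _ y; simp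
  | cons k ks ih =>
    intro dd hnd hks y
    simp only [List.foldl_cons]
    have hkk : (if dd.getD k k = rb then dd.insert k ra else dd).keys = dd.keys := by
      split
      · rw [PySem.Dict.keys_insert_of_contains]
        exact (PySem.Dict.contains_iff_mem_keys _ _).mpr (hks k (List.mem_cons_self))
      · rfl
    have hpf' : ∀ z : PNd, pvPf (if dd.getD k k = rb then dd.insert k ra else dd) z
        = if z = k ∧ pvPf dd z = rb then ra else pvPf dd z := by
      intro z
      by_cases hkrb : pvPf dd k = rb
      · rw [if_pos (by exact hkrb), pvPf_insert]
        by_cases hzk : z = k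
        · subst hzk; simp [hkrb]
        · simp [hzk]
      · rw [if_neg (by exact hkrb)]
        by_cases hzk : z = k
        · subst hzk; simp [hkrb]
        · simp [hzk]
    have ih' := ih (if dd.getD k k = rb then dd.insert k ra else dd) hnd.of_cons
      (by intro z hz; rw [hkk]; exact hks z (List.mem_cons_of_mem _ hz)) y
    rw [ih']
    by_cases hyk : y = k
    · have hkks : k ∉ ks := (List.nodup_cons.mp hnd).1
      rw [hyk]
      simp [hkks, hpf' k]
    · have h2 : pvPf (if dd.getD k k = rb then dd.insert k ra else dd) y = pvPf dd y := by
        rw [hpf' y]; simp [hyk]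
      rw [h2]
      simp [List.mem_cons, hyk]

theorem pvRelabel_keys (l : PPar) (ra rb : PNd) : (pvRelabel l ra rb).keys = l.keys :=
  pvRelabel_keys_go ra rb l.keys l (fun _ hk => hk)

theorem pvRelabel_pf (l : PPar) (ra rb : PNd) (hnd : l.keys.Nodup) (y : PNd) :
    pvPf (pvRelabel l ra rb) y = if y ∈ l.keys ∧ pvPf l y = rb then ra else pvPf l y :=
  pvRelabel_go ra rb l.keys l hnd (fun _ hk => hk) y

theorem pvChain_ne (p : PPar) (ra rb : PNd) :
    ∀ (k : Nat) (y : PNd), (∀ i, i < k → pvIter (pvPf p) i y ≠ rb) →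
    pvIter (pvPf (p.insert rb ra)) k y = pvIter (pvPf p) k y := by
  intro k
  induction k with
  | zero => intro y _; rfl
  | succ k ih =>
    intro y hne
    have h0 : y ≠ rb := hne 0 (by omega)
    simp only [pvIter, pvPf_insert, if_neg h0]
    apply ih
    intro i hi
    exact hne (i+1) (by omega)

theorem pvFirst_hit (f : PNd → PNd) (rb : PNd) :
    ∀ (k : Nat) (y : PNd), pvIter f k y = rb →
    ∃ i, i ≤ k ∧ pvIter f i y = rb ∧ ∀ j, j < i → pvIter f j y ≠ rb := by
  intro k
  induction k using Nat.strong_induction_on with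
  | _ k ihs =>
    intro y hk
    by_cases h : ∃ j, j < k ∧ pvIter f j y = rb
    · obtain ⟨j, hj, hjr⟩ := h
      obtain ⟨i, hi, hir, hmin⟩ := ihs j hj y hjr
      exact ⟨i, by omega, hir, hmin⟩
    · exact ⟨k, le_refl _, hk, fun j hj hjr => h ⟨j, hj, hjr⟩⟩

-- countP of a disjunction of disjoint tests splits into a sum
theorem pvCountP_or {p q : PNd → Bool} :
    ∀ (l : List PNd), (∀ x ∈ l, ¬(p x = true ∧ q x = true)) →
    l.countP (fun x => p x || q x) = l.countP p + l.countP q := by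
  intro l
  induction l with
  | nil => intro _; simp
  | cons x l ih =>
    intro h
    have hx := h x (List.mem_cons_self)
    simp only [List.countP_cons, ih (fun y hy => h y (List.mem_cons_of_mem _ hy))]
    cases hp : p x <;> cases hq : q x <;> simp_all <;> omega

-- the heart of the proof: one union of A corresponds to one merge of B,
-- and A's size table keeps tracking label multiplicities
theorem pvUnion_merge {S : List PNd} (hnd : S.Nodup) {p l : PPar} {d : Nat}
    (h : pvInv S p l d) {a b : PNd} (ha : a ∈ S) (hb : b ∈ S) {fuel : Nat}
    (hf : d < fuel) {sz : PSz} (hsz : pvSzInv S l sz) :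
    pvInv S (pvUnion fuel (p, sz) a b).1 (pvMergeB l a b) (d + 1) ∧
    pvSzInv S (pvMergeB l a b) (pvUnion fuel (p, sz) a b).2 := by
  have hfa := pvFind_spec h ha hf
  have hfb := pvFind_spec hfa.2 hb hf
  set p2 := (pvFind fuel (pvFind fuel p a).1 b).1 with hp2
  have h2 : pvInv S p2 l d := hfb.2
  simp only [pvUnion, pvMergeB, pvPf_def, hfa.1, hfb.1]
  by_cases hr : pvPf l a = pvPf l b
  · simp only [hr, ne_eq, not_true_eq_false, if_false]
    exact ⟨pvInv_mono h2 (by omega), hsz⟩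
  · simp only [ne_eq, hr, not_false_eq_true, if_true]
    set ra := pvPf l a with hra'
    set rb := pvPf l b with hrb'
    have hraS : ra ∈ S := h2.lbMem a ha
    have hrbS : rb ∈ S := h2.lbMem b hb
    have hrafix : pvPf p2 ra = ra := h2.rootFix a ha
    have hrbfix : pvPf p2 rb = rb := h2.rootFix b hb
    have hraroot : pvPf l ra = ra := pvLb_idem h2 ha
    have hrbroot : pvPf l rb = rb := pvLb_idem h2 hb
    have hndk : l.keys.Nodup := by rw [h2.keysL]; exact hnd
    have hlb' : ∀ y ∈ S, pvPf (pvRelabel l ra rb) y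
        = if pvPf l y = rb then ra else pvPf l y := by
      intro y hy
      rw [pvRelabel_pf l ra rb hndk y]
      simp [h2.keysL, hy]
    constructor
    · refine ⟨?_, ?_, ?_, ?_, ?_, ?_⟩
      · rw [PySem.Dict.keys_insert_of_contains, h2.keysP]
        exact (PySem.Dict.contains_iff_mem_keys _ _).mpr (h2.keysP ▸ hrbS)
      · rw [pvRelabel_keys, h2.keysL]
      · intro y hy
        rw [pvPf_insert]
        split
        · exact hraS
        · exact h2.pfMem y hy
      · intro y hy
        rw [hlb' y hy]
        split
        · exact hraS
        · exact h2.lbMem y hy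
      · intro y hy
        rw [hlb' y hy]
        by_cases hc : pvPf l y = rb
        · rw [if_pos hc, pvPf_insert, if_neg hr, hrafix]
        · rw [if_neg hc, pvPf_insert, if_neg hc, h2.rootFix y hy]
      · intro y hy
        obtain ⟨k, hk, hch⟩ := h2.chain y hy
        rw [hlb' y hy]
        by_cases hc : pvPf l y = rb
        · rw [if_pos hc]
          rw [hc] at hch
          obtain ⟨i, hik, hir, hmin⟩ := pvFirst_hit (pvPf p2) rb k y hch
          refine ⟨i + 1, by omega, ?_⟩
          rw [pvIter_add (pvPf (p2.insert rb ra)) i 1 y, pvChain_ne p2 ra rb i y hmin, hir]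
          simp [pvIter, pvPf_insert]
        · rw [if_neg hc]
          have hnotrb : ∀ j, j < k → pvIter (pvPf p2) j y ≠ rb := by
            intro j hj hjr
            have hcon : pvIter (pvPf p2) k y = rb := by
              have hks : k = j + (k - j) := by omega
              rw [hks, pvIter_add, hjr, pvIter_fix hrbfix]
            exact hc (hch.symm.trans hcon)
          exact ⟨k, by omega, by rw [pvChain_ne p2 ra rb k y hnotrb, hch]⟩
    · -- the size invariant carries over to the relabelled map
      intro r hrS hr'
      rw [hlb' r hrS] at hr'
      by_cases hrrb : pvPf l r = rb
      · rw [if_pos hrrb] at hr'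
        exfalso
        rw [← hr'] at hrrb
        rw [hraroot] at hrrb
        exact hr hrrb
      · rw [if_neg hrrb] at hr'
        have hrne_rb : r ≠ rb := by
          intro he; rw [he, hrbroot] at hrrb; exact hrrb rfl
        rw [PySem.Dict.getD_insert]
        by_cases hrra : r = ra
        · subst hrra
          rw [if_pos rfl, hsz ra hraS hraroot, hsz rb hrbS hrbroot]
          have hcnt : ((S.map (pvPf (pvRelabel l ra rb))).count ra : Int)
              = ((S.map (pvPf l)).count ra : Int) + ((S.map (pvPf l)).count rb : Int) := by
            have h1 : (S.map (pvPf (pvRelabel l ra rb))).count ra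
                = S.countP (fun y => (pvPf l y == ra) || (pvPf l y == rb)) := by
              rw [List.count_eq_countP, List.countP_map]
              apply List.countP_congr
              intro y hy
              simp only [Function.comp_apply, hlb' y hy]
              by_cases hc : pvPf l y = rb
              · simp [hc]
              · simp [hc]
            have h2' : S.countP (fun y => (pvPf l y == ra) || (pvPf l y == rb))
                = S.countP (fun y => pvPf l y == ra) + S.countP (fun y => pvPf l y == rb) := by
              apply pvCountP_or
              intro y _ hcon
              exact hr ((eq_of_beq hcon.1).symm.trans (eq_of_beq hcon.2))
            rw [h1, h2', List.count_eq_countP, List.count_eq_countP,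
              List.countP_map, List.countP_map]
            rfl
          rw [hcnt]
        · rw [if_neg hrra, hsz r hrS hr']
          congr 1
          rw [List.count_eq_countP, List.count_eq_countP, List.countP_map, List.countP_map]
          apply List.countP_congr
          intro y hy
          simp only [Function.comp_apply, hlb' y hy]
          by_cases hc : pvPf l y = rb
          · have e1 : ra ≠ r := fun he => hrra he.symm
            have e2 : rb ≠ r := Ne.symm hrne_rb
            simp [hc, e1, e2]
          · simp [hc]

-- node list facts
theorem pvMem_nodes {n m : Nat} (i j : Nat) (t : Int) (hi : i < n) (hj : j < m)
    (ht : t = 0 ∨ t = 1) : ((i : Int), (j : Int), t) ∈ pvNodes n m := by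
  simp only [pvNodes, List.mem_flatMap, List.mem_range]
  refine ⟨i, hi, j, hj, ?_⟩
  rcases ht with h | h <;> simp [h]

theorem pvNodes_nodup (n m : Nat) : (pvNodes n m).Nodup := by
  unfold pvNodes
  rw [List.nodup_flatMap]
  constructor
  · intro i _
    rw [List.nodup_flatMap]
    constructor
    · intro j _
      simp
    · refine (List.pairwise_lt_range).imp ?_
      intro j j' hlt
      simp only [Function.onFun, List.disjoint_left]
      intro a haj haj'
      simp only [List.mem_cons, List.not_mem_nil, or_false] at haj haj'
      rcases haj with rfl | rfl <;> rcases haj' with h | h <;>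
        (simp only [Prod.mk.injEq] at h; omega)
  · refine (List.pairwise_lt_range).imp ?_
    intro i i' hlt
    simp only [Function.onFun, List.disjoint_left]
    intro a hai hai'
    simp only [List.mem_flatMap, List.mem_range, List.mem_cons, List.not_mem_nil, or_false] at hai hai'
    obtain ⟨j, hj, hja⟩ := hai
    obtain ⟨j', hj', hja'⟩ := hai'
    rcases hja with rfl | rfl <;> rcases hja' with h | h <;>
      (simp only [Prod.mk.injEq] at h; omega)

def pvCells (n m : Nat) : List (Nat × Nat) :=
  (List.range n).flatMap (fun i => (List.range m).map (fun j => (i, j)))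

theorem pvFoldl_cells {σ : Type} (n m : Nat) (body : σ → Nat → Nat → σ) (s0 : σ) :
    (List.range n).foldl (fun s i => (List.range m).foldl (fun s j => body s i j) s) s0
      = (pvCells n m).foldl (fun s c => body s c.1 c.2) s0 := by
  simp [pvCells, List.foldl_flatMap, List.foldl_map]

theorem pvCells_mem {n m : Nat} {c : Nat × Nat} (h : c ∈ pvCells n m) :
    c.1 < n ∧ c.2 < m := by
  simp only [pvCells, List.mem_flatMap, List.mem_map, List.mem_range] at h
  obtain ⟨i, hi, j, hj, rfl⟩ := h
  exact ⟨hi, hj⟩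

theorem pvCells_length (n m : Nat) : (pvCells n m).length = n * m := by
  simp [pvCells, List.length_flatMap, List.map_const', List.sum_replicate, smul_eq_mul]

theorem pvEdges_eq_cells_fold (n m : Nat) (grid : List (List Int)) (l0 : PPar) :
    (pvEdges n m grid).foldl (fun l e => pvMergeB l e.1 e.2) l0
      = (pvCells n m).foldl
          (fun l c => (pvCellEdges n m grid c.1 c.2).foldl (fun l e => pvMergeB l e.1 e.2) l)
          l0 := by
  simp [pvEdges, pvCells, List.foldl_flatMap, List.foldl_map]

theorem pvNodes_eq_cells_flatMap (n m : Nat) :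
    pvNodes n m = (pvCells n m).flatMap
      (fun c => [((c.1:Int), (c.2:Int), (0:Int)), ((c.1:Int), (c.2:Int), (1:Int))]) := by
  simp [pvNodes, pvCells, List.flatMap_map, List.flatMap_assoc]

-- the initial state: every node its own parent/label, every size 1
def pvInit (n m : Nat) : PPar × PSz :=
  (List.range n).foldl (fun pr i =>
      (List.range m).foldl (fun pr j => pvInitCellA pr i j) pr)
    (PySem.Dict.empty, PySem.Dict.empty)

theorem pvInitRow_go (i : Nat) : ∀ (cols : List Nat) (a : PPar) (b : PSz),
    cols.foldl (fun pr j => pvInitCellA pr i j) (a, b)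
      = (cols.foldl (fun d j => [(0:Int),1].foldl (fun d t => d.insert (↑i,↑j,t) (↑i,↑j,t)) d) a,
         cols.foldl (fun d j => [(0:Int),1].foldl (fun d t => d.insert (↑i,↑j,t) (1:Int)) d) b) := by
  intro cols
  induction cols with
  | nil => intro a b; rfl
  | cons c cols ih =>
    intro a b
    simp only [List.foldl_cons]
    rw [show pvInitCellA (a, b) i c
        = ([(0:Int),1].foldl (fun d t => d.insert (↑i,↑c,t) (↑i,↑c,t)) a,
           [(0:Int),1].foldl (fun d t => d.insert (↑i,↑c,t) (1:Int)) b) from rfl]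
    exact ih _ _

theorem pvInit_go (m : Nat) : ∀ (rows : List Nat) (a : PPar) (b : PSz),
    rows.foldl (fun pr i => (List.range m).foldl (fun pr j => pvInitCellA pr i j) pr) (a, b)
      = (rows.foldl (fun d i => (List.range m).foldl (fun d j => [(0:Int),1].foldl (fun d t => d.insert (↑i,↑j,t) (↑i,↑j,t)) d) d) a,
         rows.foldl (fun d i => (List.range m).foldl (fun d j => [(0:Int),1].foldl (fun d t => d.insert (↑i,↑j,t) (1:Int)) d) d) b) := by
  intro rows
  induction rows with
  | nil => intro a b; rfl
  | cons r rows ih =>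
    intro a b
    simp only [List.foldl_cons]
    rw [pvInitRow_go r (List.range m) a b]
    exact ih _ _

theorem pvInit_pair (n m : Nat) : pvInit n m =
    ((pvNodes n m).foldl (fun d x => d.insert x x) PySem.Dict.empty,
     (pvNodes n m).foldl (fun d x => d.insert x (1:Int)) PySem.Dict.empty) := by
  unfold pvInit
  rw [pvInit_go m (List.range n) PySem.Dict.empty PySem.Dict.empty]
  simp only [pvNodes, List.foldl_flatMap, Prod.mk.injEq]
  constructor <;> simp only [List.foldl_cons, List.foldl_nil]

theorem pvInit_fst_items (n m : Nat) :
    (pvInit n m).1.items = (pvNodes n m).map (fun x => (x, x)) := by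
  rw [pvInit_pair]
  have h := PySem.Dict.items_foldl_insert_fresh (pvNodes n m)
    (fun x => x) (fun x => x) (PySem.Dict.empty : PPar)
    (by intro a _; simp [PySem.Dict.contains_empty])
    (by simpa using pvNodes_nodup n m)
  simpa using h

theorem pvInit_snd_items (n m : Nat) :
    (pvInit n m).2.items = (pvNodes n m).map (fun x => (x, (1:Int))) := by
  rw [pvInit_pair]
  have h := PySem.Dict.items_foldl_insert_fresh (pvNodes n m)
    (fun x => x) (fun _ => (1:Int)) (PySem.Dict.empty : PSz)
    (by intro a _; simp [PySem.Dict.contains_empty])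
    (by simpa using pvNodes_nodup n m)
  simpa using h

theorem pvInit_keys (n m : Nat) : (pvInit n m).1.keys = pvNodes n m := by
  simp [PySem.Dict.keys, pvInit_fst_items, List.map_map, Function.comp_def]

theorem pvInit_snd_keys (n m : Nat) : (pvInit n m).2.keys = pvNodes n m := by
  simp [PySem.Dict.keys, pvInit_snd_items, List.map_map, Function.comp_def]

theorem pvInit_pf (n m : Nat) {x : PNd} (hx : x ∈ pvNodes n m) :
    pvPf (pvInit n m).1 x = x := by
  have hnd : (pvInit n m).1.keys.Nodup := by
    rw [pvInit_keys]; exact pvNodes_nodup n m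
  have hmem : (x, x) ∈ (pvInit n m).1.items := by
    rw [pvInit_fst_items]; exact List.mem_map_of_mem hx
  exact PySem.Dict.getD_of_mem_items _ hmem hnd x

theorem pvInit_inv (n m : Nat) : pvInv (pvNodes n m) (pvInit n m).1 (pvInit n m).1 0 := by
  refine ⟨pvInit_keys n m, pvInit_keys n m, ?_, ?_, ?_, ?_⟩
  · intro x hx; rw [pvInit_pf n m hx]; exact hx
  · intro x hx; rw [pvInit_pf n m hx]; exact hx
  · intro x hx; rw [pvInit_pf n m hx, pvInit_pf n m hx]
  · intro x hx
    exact ⟨0, le_refl 0, by simp [pvIter, pvInit_pf n m hx]⟩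

theorem pvInit_szInv (n m : Nat) : pvSzInv (pvNodes n m) (pvInit n m).1 (pvInit n m).2 := by
  intro r hr _
  have hnd2 : (pvInit n m).2.keys.Nodup := by
    rw [pvInit_snd_keys]; exact pvNodes_nodup n m
  have hmem : (r, (1:Int)) ∈ (pvInit n m).2.items := by
    rw [pvInit_snd_items]; exact List.mem_map_of_mem hr
  rw [PySem.Dict.getD_of_mem_items _ hmem hnd2 0]
  have hmap : (pvNodes n m).map (pvPf (pvInit n m).1) = pvNodes n m := by
    have := List.map_congr_left (fun x hx => pvInit_pf n m (x := x) hx)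
    rw [this]; simp
  simp [hmap, List.count_eq_one_of_mem (pvNodes_nodup n m) hr]

-- one cell of the linking loops: A's two conditional unions against B's per-cell edge slice
theorem pvLink_sim {n m : Nat} (grid : List (List Int)) (hnd : (pvNodes n m).Nodup)
    {p l : PPar} {sz : PSz} {d : Nat} (h : pvInv (pvNodes n m) p l d)
    (hsz : pvSzInv (pvNodes n m) l sz)
    {i j : Nat} (hi : i < n) (hj : j < m) (hd : d + 2 ≤ 2 * (n * m)) :
    pvInv (pvNodes n m) (pvLinkCellA (2*n*m+1) n m grid (p, sz) i j).1
      ((pvCellEdges n m grid i j).foldl (fun l e => pvMergeB l e.1 e.2) l) (d + 2) ∧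
    pvSzInv (pvNodes n m)
      ((pvCellEdges n m grid i j).foldl (fun l e => pvMergeB l e.1 e.2) l)
      (pvLinkCellA (2*n*m+1) n m grid (p, sz) i j).2 := by
  have hmul : 2 * n * m = 2 * (n * m) := Nat.mul_assoc 2 n m
  have hf1 : d < 2*n*m+1 := by omega
  have hf2 : d + 1 < 2*n*m+1 := by omega
  have hx0 : ((i:Int), (j:Int), (0:Int)) ∈ pvNodes n m := pvMem_nodes i j 0 hi hj (Or.inl rfl)
  have hx1 : ((i:Int), (j:Int), (1:Int)) ∈ pvNodes n m := pvMem_nodes i j 1 hi hj (Or.inr rfl)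
  simp only [pvLinkCellA, pvCellEdges]
  by_cases hc1 : j + 1 < m
  · have hy0 : ((i:Int), ((j+1 : Nat):Int), (0:Int)) ∈ pvNodes n m :=
      pvMem_nodes i (j+1) 0 hi hc1 (Or.inl rfl)
    have hy1 : ((i:Int), ((j+1 : Nat):Int), (1:Int)) ∈ pvNodes n m :=
      pvMem_nodes i (j+1) 1 hi hc1 (Or.inr rfl)
    simp only [hc1, if_true]
    by_cases hc3 : i + 1 < n
    · have hz0 : (((i+1 : Nat):Int), (j:Int), (0:Int)) ∈ pvNodes n m :=
        pvMem_nodes (i+1) j 0 hc3 hj (Or.inl rfl)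
      have hz1 : (((i+1 : Nat):Int), (j:Int), (1:Int)) ∈ pvNodes n m :=
        pvMem_nodes (i+1) j 1 hc3 hj (Or.inr rfl)
      simp only [hc3, if_true]
      by_cases hc2 : (grid.getD i []).getD j 0 = 1
      · simp only [hc2, if_true, List.singleton_append, List.foldl_cons, List.foldl_nil]
        have hU1 := pvUnion_merge hnd h hx1 hy0 hf1 hsz
        exact pvUnion_merge hnd hU1.1 hx0 hz1 hf2 hU1.2
      · simp only [hc2, if_false, List.singleton_append, List.foldl_cons, List.foldl_nil]
        have hU1 := pvUnion_merge hnd h hx0 hy1 hf1 hsz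
        exact pvUnion_merge hnd hU1.1 hx1 hz0 hf2 hU1.2
    · simp only [hc3, if_false]
      by_cases hc2 : (grid.getD i []).getD j 0 = 1
      · simp only [hc2, if_true, List.append_nil, List.foldl_cons, List.foldl_nil]
        have hU1 := pvUnion_merge hnd h hx1 hy0 hf1 hsz
        exact ⟨pvInv_mono hU1.1 (by omega), hU1.2⟩
      · simp only [hc2, if_false, List.append_nil, List.foldl_cons, List.foldl_nil]
        have hU1 := pvUnion_merge hnd h hx0 hy1 hf1 hsz
        exact ⟨pvInv_mono hU1.1 (by omega), hU1.2⟩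
  · simp only [hc1, if_false]
    by_cases hc3 : i + 1 < n
    · have hz0 : (((i+1 : Nat):Int), (j:Int), (0:Int)) ∈ pvNodes n m :=
        pvMem_nodes (i+1) j 0 hc3 hj (Or.inl rfl)
      have hz1 : (((i+1 : Nat):Int), (j:Int), (1:Int)) ∈ pvNodes n m :=
        pvMem_nodes (i+1) j 1 hc3 hj (Or.inr rfl)
      simp only [hc3, if_true]
      by_cases hc2 : (grid.getD i []).getD j 0 = 1
      · simp only [hc2, if_true, List.nil_append, List.foldl_cons, List.foldl_nil]
        have hU1 := pvUnion_merge hnd h hx0 hz1 hf1 hsz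
        exact ⟨pvInv_mono hU1.1 (by omega), hU1.2⟩
      · simp only [hc2, if_false, List.nil_append, List.foldl_cons, List.foldl_nil]
        have hU1 := pvUnion_merge hnd h hx1 hz0 hf1 hsz
        exact ⟨pvInv_mono hU1.1 (by omega), hU1.2⟩
    · simp only [hc3, if_false]
      have : ((if (grid.getD i []).getD j 0 = 1 then ([] ++ [] : List (PNd × PNd))
          else ([] ++ [] : List (PNd × PNd))).foldl (fun l e => pvMergeB l e.1 e.2) l) = l := by
        split <;> rfl
      rw [this]
      exact ⟨pvInv_mono h (by omega), hsz⟩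

-- the full linking loop
theorem pvCells_sim (n m : Nat) (grid : List (List Int)) (hnd : (pvNodes n m).Nodup) :
    ∀ (cells : List (Nat × Nat)), (∀ c ∈ cells, c.1 < n ∧ c.2 < m) →
    ∀ (d : Nat) (stA : PPar × PSz) (l : PPar), pvInv (pvNodes n m) stA.1 l d →
      pvSzInv (pvNodes n m) l stA.2 →
      d + 2 * cells.length ≤ 2 * (n * m) →
      pvInv (pvNodes n m)
        (cells.foldl (fun st c => pvLinkCellA (2*n*m+1) n m grid st c.1 c.2) stA).1
        (cells.foldl
          (fun l c => (pvCellEdges n m grid c.1 c.2).foldl (fun l e => pvMergeB l e.1 e.2) l) l)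
        (d + 2 * cells.length) ∧
      pvSzInv (pvNodes n m)
        (cells.foldl
          (fun l c => (pvCellEdges n m grid c.1 c.2).foldl (fun l e => pvMergeB l e.1 e.2) l) l)
        (cells.foldl (fun st c => pvLinkCellA (2*n*m+1) n m grid st c.1 c.2) stA).2 := by
  intro cells
  induction cells with
  | nil =>
    intro _ d stA l h hsz _
    simpa using ⟨h, hsz⟩
  | cons c cells ih =>
    intro hv d stA l h hsz hb
    simp only [List.foldl_cons, List.length_cons] at *
    obtain ⟨hc1, hc2⟩ := hv c (List.mem_cons_self)
    obtain ⟨aPar, aSz⟩ := stA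
    simp only at h hsz
    have hstep := pvLink_sim (sz := aSz) grid hnd h hsz hc1 hc2 (by omega)
    have hres := ih (fun c' hc' => hv c' (List.mem_cons_of_mem _ hc')) (d + 2)
      (pvLinkCellA (2*n*m+1) n m grid (aPar, aSz) c.1 c.2)
      ((pvCellEdges n m grid c.1 c.2).foldl (fun l e => pvMergeB l e.1 e.2) l)
      hstep.1 hstep.2 (by omega)
    have harith : d + 2 * (cells.length + 1) = d + 2 + 2 * cells.length := by ring
    rw [harith]
    exact hres

-- the abstract per-node step of A's final pass
def pvStep (sz : PSz) (l : PPar) (acc : Int × PySem.Set PNd) (x : PNd) :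
    Int × PySem.Set PNd :=
  let r := pvPf l x
  if !(PySem.Set.contains acc.2 r) then (max acc.1 (sz.getD r 0), PySem.Set.add acc.2 r)
  else acc

theorem pvBestCellA_abs {n m : Nat} {l : PPar} {d : Nat}
    (sz : PSz) {p : PPar} (h : pvInv (pvNodes n m) p l d) {i j : Nat}
    (hi : i < n) (hj : j < m) (hd : d < 2*n*m+1) (best : Int) (vis : PySem.Set PNd) :
    pvBestCellA (2*n*m+1) sz (best, vis, p) i j
      = ((pvStep sz l (pvStep sz l (best, vis) (↑i,↑j,0)) (↑i,↑j,1)).1,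
         (pvStep sz l (pvStep sz l (best, vis) (↑i,↑j,0)) (↑i,↑j,1)).2,
         (pvFind (2*n*m+1) (pvFind (2*n*m+1) p (↑i,↑j,0)).1 (↑i,↑j,1)).1) ∧
    pvInv (pvNodes n m) (pvFind (2*n*m+1) (pvFind (2*n*m+1) p (↑i,↑j,0)).1 (↑i,↑j,1)).1 l d := by
  have hx0 : ((i:Int), (j:Int), (0:Int)) ∈ pvNodes n m := pvMem_nodes i j 0 hi hj (Or.inl rfl)
  have hx1 : ((i:Int), (j:Int), (1:Int)) ∈ pvNodes n m := pvMem_nodes i j 1 hi hj (Or.inr rfl)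
  have hf1 := pvFind_spec h hx0 hd
  have hf2 := pvFind_spec hf1.2 hx1 hd
  refine ⟨?_, hf2.2⟩
  simp only [pvBestCellA, pvStep, hf1.1, hf2.1]
  split_ifs <;> rfl

-- the full best pass of A is a pvStep fold over all nodes
theorem pvBestA_fold (n m : Nat) {l : PPar} {d : Nat} (sz : PSz) :
    ∀ (cells : List (Nat × Nat)), (∀ c ∈ cells, c.1 < n ∧ c.2 < m) →
    ∀ (acc : Int × PySem.Set PNd) (p : PPar), pvInv (pvNodes n m) p l d →
      d < 2*n*m+1 →
      (cells.foldl (fun acc c => pvBestCellA (2*n*m+1) sz acc c.1 c.2) (acc.1, acc.2, p)).1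
        = ((cells.flatMap
            (fun c => [((c.1:Int), (c.2:Int), (0:Int)), ((c.1:Int), (c.2:Int), (1:Int))])).foldl
            (pvStep sz l) acc).1 := by
  intro cells
  induction cells with
  | nil => intro _ acc p _ _; rfl
  | cons c cells ih =>
    intro hv acc p h hd
    obtain ⟨hc1, hc2⟩ := hv c (List.mem_cons_self)
    obtain ⟨hcell, hinv⟩ := pvBestCellA_abs sz h hc1 hc2 hd acc.1 acc.2
    simp only [List.foldl_cons, List.flatMap_cons, List.foldl_append]
    rw [hcell]
    simp only [List.foldl_nil]
    exact ih (fun c' hc' => hv c' (List.mem_cons_of_mem _ hc'))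
      (pvStep sz l (pvStep sz l (acc.1, acc.2) ((c.1:Int), (c.2:Int), 0)) ((c.1:Int), (c.2:Int), 1))
      _ hinv hd

-- a visited-set max fold is a plain max fold
theorem pvStep_fold_max (sz : PSz) (l : PPar) :
    ∀ (xs : List PNd) (best : Int) (vis : PySem.Set PNd),
      (∀ r, PySem.Set.contains vis r = true → sz.getD r 0 ≤ best) →
      (xs.foldl (pvStep sz l) (best, vis)).1
        = xs.foldl (fun b x => max b (sz.getD (pvPf l x) 0)) best := by
  intro xs
  induction xs with
  | nil => intro best vis _; rfl
  | cons x xs ih =>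
    intro best vis hvis
    simp only [List.foldl_cons, pvStep]
    by_cases hc : PySem.Set.contains vis (pvPf l x)
    · simp only [hc, Bool.not_true, Bool.false_eq_true, if_false]
      rw [max_eq_left (hvis _ hc)]
      exact ih best vis hvis
    · simp only [hc, Bool.not_false, if_true]
      apply ih
      intro r hr
      rw [PySem.Set.contains_iff] at hr
      rw [PySem.Set.mem_add] at hr
      rcases hr with hr | hr
      · exact le_trans (hvis r ((PySem.Set.contains_iff vis r).mpr hr)) (le_max_left _ _)
      · subst hr; exact le_max_right _ _

-- a max fold only depends on which values occur
theorem pvFoldl_max_le_iff (f : PNd → Int) (s : List PNd) (a c : Int) :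
    s.foldl (fun b x => max b (f x)) a ≤ c ↔ a ≤ c ∧ ∀ x ∈ s, f x ≤ c := by
  induction s generalizing a with
  | nil => simp
  | cons x s ih =>
    simp only [List.foldl_cons, ih, max_le_iff, List.mem_cons]
    constructor
    · rintro ⟨⟨h1, h2⟩, h3⟩
      exact ⟨h1, fun y hy => by rcases hy with rfl | hy; exact h2; exact h3 y hy⟩
    · rintro ⟨h1, h2⟩
      exact ⟨⟨h1, h2 x (Or.inl rfl)⟩, fun y hy => h2 y (Or.inr hy)⟩

theorem pvFoldl_max_mem_eq (f : PNd → Int) {s t : List PNd}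
    (h : ∀ x, x ∈ s ↔ x ∈ t) (a : Int) :
    s.foldl (fun b x => max b (f x)) a = t.foldl (fun b x => max b (f x)) a := by
  apply le_antisymm
  · rw [pvFoldl_max_le_iff]
    exact ⟨((pvFoldl_max_le_iff f t a _).mp (le_refl _)).1,
      fun x hx => ((pvFoldl_max_le_iff f t a _).mp (le_refl _)).2 x ((h x).mp hx)⟩
  · rw [pvFoldl_max_le_iff]
    exact ⟨((pvFoldl_max_le_iff f s a _).mp (le_refl _)).1,
      fun x hx => ((pvFoldl_max_le_iff f s a _).mp (le_refl _)).2 x ((h x).mpr hx)⟩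

-- a present key's getD does not depend on the default
theorem pvGetD_default_irrel (dct : PPar) (hnd : dct.keys.Nodup) {k : PNd}
    (hk : k ∈ dct.keys) (d0 : PNd) : dct.getD k d0 = pvPf dct k := by
  simp only [PySem.Dict.keys] at hk
  obtain ⟨pr, hpr, hpr1⟩ := List.mem_map.mp hk
  have hmem : (k, pr.2) ∈ dct.items := by rw [← hpr1]; simpa using hpr
  have h1 := PySem.Dict.getD_of_mem_items dct hmem hnd d0
  have h2 := PySem.Dict.getD_of_mem_items dct hmem hnd k
  rw [h1, ← h2]; rfl

theorem solution_main (grid : List (List Int)) : solution grid = solution_alt grid := by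
  simp only [solution, solution_alt]
  set n := grid.length with hn
  set m := (grid.headD []).length with hm
  have hmul : 2 * n * m = 2 * (n * m) := Nat.mul_assoc 2 n m
  -- the two initial maps coincide
  rw [show (List.range n).foldl (fun pr i =>
        (List.range m).foldl (fun pr j => pvInitCellA pr i j) pr)
        (PySem.Dict.empty, PySem.Dict.empty) = pvInit n m from rfl]
  have hl0 : (pvNodes n m).foldl (fun d x => d.insert x x) PySem.Dict.empty
      = (pvInit n m).1 := by rw [pvInit_pair]
  rw [hl0]
  -- both linking loops, as folds over the same cell list
  rw [pvFoldl_cells n m (fun st i j => pvLinkCellA (2*n*m+1) n m grid st i j) (pvInit n m)]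
  rw [pvEdges_eq_cells_fold]
  set stA := (pvCells n m).foldl
      (fun st c => pvLinkCellA (2*n*m+1) n m grid st c.1 c.2) (pvInit n m) with hstA
  set lbl := (pvCells n m).foldl
      (fun l c => (pvCellEdges n m grid c.1 c.2).foldl (fun l e => pvMergeB l e.1 e.2) l)
      (pvInit n m).1 with hlbl
  have hsim := pvCells_sim n m grid (pvNodes_nodup n m) (pvCells n m)
      (fun c hc => pvCells_mem hc) 0 (pvInit n m) (pvInit n m).1 (pvInit_inv n m)
      (pvInit_szInv n m) (by rw [pvCells_length]; omega)
  rw [← hstA, ← hlbl] at hsim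
  obtain ⟨hinv, hsz⟩ := hsim
  have hd : 2 * (n * m) < 2*n*m+1 := by omega
  -- A's final pass: fold over all nodes, then a plain max fold
  rw [pvFoldl_cells n m (fun acc i j => pvBestCellA (2*n*m+1) stA.2 acc i j)
      ((0:Int), PySem.Set.empty, stA.1)]
  have hA := pvBestA_fold n m (l := lbl) stA.2 (pvCells n m) (fun c hc => pvCells_mem hc)
      ((0:Int), PySem.Set.empty) stA.1 hinv (by rw [pvCells_length]; omega)
  rw [hA, ← pvNodes_eq_cells_flatMap]
  rw [pvStep_fold_max stA.2 lbl (pvNodes n m) 0 PySem.Set.empty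
      (by intro r hr; simp [PySem.Set.empty] at hr)]
  -- replace sizes at roots by label multiplicities
  set L := (pvNodes n m).map (pvPf lbl) with hL
  have hcong : (pvNodes n m).foldl (fun b x => max b (stA.2.getD (pvPf lbl x) 0)) 0
      = (pvNodes n m).foldl (fun b x => max b ((L.count (pvPf lbl x) : Int))) 0 := by
    apply PySem.List.foldl_congr_mem
    intro acc x hx
    rw [hsz (pvPf lbl x) (hinv.lbMem x hx) (pvLb_idem hinv hx)]
  rw [hcong]
  have hAfold : (pvNodes n m).foldl (fun b x => max b ((L.count (pvPf lbl x) : Int))) 0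
      = L.foldl (fun b r => max b ((L.count r : Int))) 0 := by
    rw [hL, List.foldl_map]
  rw [hAfold]
  -- B's final pass: the counter of L
  have hndk : lbl.keys.Nodup := by rw [hinv.keysL]; exact pvNodes_nodup n m
  have hvals : lbl.values = L := by
    rw [PySem.Dict.values_eq_map_keys lbl hndk ((0:Int),(0:Int),(0:Int)), hinv.keysL, hL]
    apply List.map_congr_left
    intro x hx
    exact pvGetD_default_irrel lbl hndk (hinv.keysL ▸ hx) _
  rw [hvals, PySem.Dict.foldl_insert_getD_add_one_eq_counter]
  have hcvals : (PySem.Dict.counter L).values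
      = (PySem.Set.ofList L : List PNd).map (fun k => ((L.count k : Int))) := by
    show ((PySem.Dict.counter L).items.map (·.2)) = _
    rw [PySem.Dict.items_counter, List.map_map]
    rfl
  rw [hcvals]
  have hmax : ∀ (b c : Int), (if c > b then c else b) = max b c := by
    intro b c
    by_cases hlt : b < c
    · rw [if_pos hlt, max_eq_right (le_of_lt hlt)]
    · rw [if_neg hlt, max_eq_left (not_lt.mp hlt)]
  have hBfold : ((PySem.Set.ofList L : List PNd).map (fun k => ((L.count k : Int)))).foldl
        (fun best c => if c > best then c else best) 0
      = (PySem.Set.ofList L : List PNd).foldl (fun b k => max b ((L.count k : Int))) 0 := by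
    rw [List.foldl_map]
    apply PySem.List.foldl_congr_mem
    intro acc x _
    exact hmax acc _
  rw [hBfold]
  exact pvFoldl_max_mem_eq (fun r => (L.count r : Int))
    (fun x => (PySem.Set.mem_ofList L x).symm) 0

-- ===== VERDICT (by name: the statement is the Claim_ definition above) =====
theorem solution_spec : Claim_equal_solution := by
  intro grid _hdom _hpre
  exact solution_main grid
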